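-- pv_equiv track=rewrite | github.com/Idanco000/DeepLearnProject | src/util.py | remove_repeated_phrases
-- ===== SOURCE A (Python) =====
-- def remove_repeated_phrases(song, max_repeats):
--     """Reduce repeated phrases within a song to the specified max_repeats limit."""
--     lines = song.split("\n")
--     unique_lines = []
--     line_index = 0
--
--     while line_index < len(lines):
--         current_line = lines[line_index].strip()
--         unique_lines.append(current_line)
--         line_index += 1
--         repeat_count = 0
--
--         while line_index < len(lines):
--             next_line = lines[line_index].strip()
--             if current_line != next_line:
--                 break
--             repeat_count += 1
--             if repeat_count < max_repeats:
--                 unique_lines.append(next_line)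
--             line_index += 1
--
--     return " \n ".join(unique_lines)
-- ===== SOURCE B (Python) =====
-- def remove_repeated_phrases(song, max_repeats):
--     """Reduce repeated phrases within a song to the specified max_repeats limit.
--
--     Single pass run-length encoding with a sentinel flush: count each run of
--     identical stripped lines, then emit max(1, min(run, max_repeats)) copies.
--     """
--     stripped = [line.strip() for line in song.split("\n")]
--     out = []
--     prev = None
--     run = 0
--     for line in stripped + [None]:  # None sentinel flushes the last run
--         if line == prev:
--             run += 1
--         else:
--             if run:
--                 out.extend([prev] * max(1, min(run, max_repeats)))
--             prev, run = line, 1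
--     return " \n ".join(out)
-- ===== Notes on version B (the rewrite author's own statement) =====
-- stated objective: alternative
-- what changed: A's nested dual-index while loops (outer picks a line, inner re-scans and conditionally appends duplicates) are replaced by a single run-length-encoding pass with a sentinel flush: strip all lines once, count each run of identical consecutive lines, and emit max(1, min(run, max_repeats)) copies at run boundaries.
import Mathlib
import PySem

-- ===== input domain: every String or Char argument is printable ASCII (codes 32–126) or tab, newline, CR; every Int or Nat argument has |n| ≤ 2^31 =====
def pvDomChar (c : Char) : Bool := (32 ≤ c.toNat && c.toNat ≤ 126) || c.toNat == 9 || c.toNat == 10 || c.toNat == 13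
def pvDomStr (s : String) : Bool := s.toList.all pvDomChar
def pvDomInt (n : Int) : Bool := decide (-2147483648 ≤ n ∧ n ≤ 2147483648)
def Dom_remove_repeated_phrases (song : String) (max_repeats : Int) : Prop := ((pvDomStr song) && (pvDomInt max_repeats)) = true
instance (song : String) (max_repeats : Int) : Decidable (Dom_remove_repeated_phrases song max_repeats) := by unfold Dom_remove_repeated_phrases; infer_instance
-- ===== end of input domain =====

-- B replaces A's nested dual-index scan by a single run-length-encoding pass with a
-- sentinel flush (objective: alternative decomposition, same cost).

-- ===== PORT A =====
-- A's inner while loop: consumes duplicates of `cur`, returning the appended lines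
-- and the unconsumed suffix (the suffix from the current line index on).
def pvAInner (cur : String) (mr : Int) (rc : Int) : List String → (List String × List String)
  | [] => ([], [])
  | l :: ls =>
    let nl := PySem.Str.strip l
    if cur ≠ nl then ([], l :: ls)
    else
      let rc' := rc + 1
      let pre := if rc' < mr then [nl] else []
      let r := pvAInner cur mr rc' ls
      (pre ++ r.1, r.2)

theorem pvAInner_len (cur : String) (mr : Int) : ∀ (rc : Int) (ls : List String),
    (pvAInner cur mr rc ls).2.length ≤ ls.length := by
  intro rc ls
  induction ls generalizing rc with
  | nil => simp [pvAInner]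
  | cons l ls ih =>
    simp only [pvAInner]
    split
    · simp
    · exact Nat.le_succ_of_le (ih _)

-- A's outer while loop over the remaining lines.
def pvAOuter (mr : Int) : List String → List String
  | [] => []
  | l :: ls =>
    let cur := PySem.Str.strip l
    let r := pvAInner cur mr 0 ls
    cur :: (r.1 ++ pvAOuter mr r.2)
termination_by ls => ls.length
decreasing_by exact Nat.lt_succ_of_le (pvAInner_len _ _ _ _)

def remove_repeated_phrases (song : String) (max_repeats : Int) : String :=
  PySem.Str.join " \n " (pvAOuter max_repeats ((PySem.Str.split? song "\n").getD []))

-- ===== PORT B =====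
-- emit max(1, min(run, max_repeats)) copies of a run's line
def pvBEmit (mr : Int) (s : String) (run : Int) : List String :=
  List.replicate (Int.toNat (max 1 (min run mr))) s

-- one step of Source B's for-loop; state = (out, prev, run); prev is a string whenever run ≠ 0
def pvBStep (mr : Int) (st : List String × Option String × Int) (x : Option String) :
    List String × Option String × Int :=
  if x = st.2.1 then (st.1, st.2.1, st.2.2 + 1)
  else
    let out' := if st.2.2 ≠ 0 then
        st.1 ++ (match st.2.1 with | some s => pvBEmit mr s st.2.2 | none => [])
      else st.1
    (out', x, 1)

def remove_repeated_phrases_alt (song : String) (max_repeats : Int) : String :=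
  let stripped := ((PySem.Str.split? song "\n").getD []).map PySem.Str.strip
  let res := (stripped.map some ++ [none]).foldl (pvBStep max_repeats) ([], none, 0)
  PySem.Str.join " \n " res.1

-- ===== PRECONDITION & SPEC =====
def Spec_remove_repeated_phrases (song : String) (max_repeats : Int) (out : String) : Prop := out = remove_repeated_phrases_alt song max_repeats
instance (song : String) (max_repeats : Int) (out : String) : Decidable (Spec_remove_repeated_phrases song max_repeats out) := by unfold Spec_remove_repeated_phrases; infer_instance

-- ===== CLAIM (what is proved, stated in full; the proofs are below) =====
def Claim_equal_remove_repeated_phrases : Prop := ∀ (song : String) (max_repeats : Int), Dom_remove_repeated_phrases song max_repeats → Spec_remove_repeated_phrases song max_repeats (remove_repeated_phrases song max_repeats)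

-- ===== LEMMAS AND PROOFS =====

-- proof-only: the lines B emits when the current run is (s, r) and xs stripped lines remain
def pvEmitAll (mr : Int) : String → Int → List String → List String
  | s, r, [] => pvBEmit mr s r
  | s, r, x :: xs => if x = s then pvEmitAll mr s (r+1) xs else pvBEmit mr s r ++ pvEmitAll mr x 1 xs

theorem pvBfold (mr : Int) : ∀ (xs : List String) (out : List String) (s : String) (r : Int),
    1 ≤ r →
    ((xs.map some ++ [none]).foldl (pvBStep mr) (out, some s, r)).1 = out ++ pvEmitAll mr s r xs := by
  intro xs
  induction xs with
  | nil =>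
    intro out s r hr
    have hne : (none : Option String) ≠ some s := by simp
    have hr0 : r ≠ 0 := by omega
    simp [pvBStep, pvEmitAll, hne, hr0]
  | cons x xs ih =>
    intro out s r hr
    by_cases hx : x = s
    · subst hx
      simp only [List.map_cons, List.cons_append, List.foldl_cons, pvBStep,
        pvEmitAll]
      exact ih out x (r+1) (by omega)
    · have hne : (some x) ≠ some s := by simpa using hx
      have hr0 : r ≠ 0 := by omega
      simp only [List.map_cons, List.cons_append, List.foldl_cons, pvBStep, if_neg hne,
        hr0, ne_eq, not_false_eq_true, if_pos, pvEmitAll, if_neg hx]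
      rw [ih _ x 1 (by omega), List.append_assoc]

theorem pvRepl_step (r mr : Int) (hr : 1 ≤ r) (c : String) :
    List.replicate (Int.toNat (max 1 (min r mr))) c ++ (if r < mr then [c] else []) =
      List.replicate (Int.toNat (max 1 (min (r+1) mr))) c := by
  by_cases h : r < mr
  · rw [if_pos h]
    have : Int.toNat (max 1 (min (r+1) mr)) = Int.toNat (max 1 (min r mr)) + 1 := by omega
    rw [this, List.replicate_succ']
  · rw [if_neg h]
    have : Int.toNat (max 1 (min (r+1) mr)) = Int.toNat (max 1 (min r mr)) := by omega
    rw [this, List.append_nil]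

theorem pvAchar (mr : Int) : ∀ (ls : List String) (cur : String) (r : Int), 1 ≤ r →
    List.replicate (Int.toNat (max 1 (min r mr))) cur ++
      ((pvAInner cur mr (r-1) ls).1 ++ pvAOuter mr (pvAInner cur mr (r-1) ls).2) =
    pvEmitAll mr cur r (ls.map PySem.Str.strip) := by
  intro ls
  induction ls with
  | nil =>
    intro cur r hr
    simp [pvAInner, pvAOuter, pvEmitAll, pvBEmit]
  | cons l ls ih =>
    intro cur r hr
    by_cases hx : PySem.Str.strip l = cur
    · have hcur : (cur ≠ PySem.Str.strip l) = False := by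
        simp only [eq_iff_iff, iff_false, ne_eq, not_not]; exact hx.symm
      have hrc : r - 1 + 1 = r := by omega
      have ihr := ih cur (r + 1) (by omega)
      rw [show r + 1 - 1 = r from by omega] at ihr
      simp only [pvAInner, List.map_cons, pvEmitAll, hx, hrc, ne_eq, not_true_eq_false,
        if_false, if_true]
      simp only [← List.append_assoc]
      rw [pvRepl_step r mr hr cur]
      simp only [List.append_assoc]
      exact ihr
    · have hne : cur ≠ PySem.Str.strip l := fun h => hx h.symm
      simp only [pvAInner, if_pos hne, List.map_cons, pvEmitAll, if_neg hx]
      rw [pvAOuter]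
      have h1 : Int.toNat (max 1 (min (1:Int) mr)) = 1 := by omega
      have := ih (PySem.Str.strip l) 1 le_rfl
      simp only [h1, List.replicate_one, List.singleton_append, show (1:Int) - 1 = 0 from rfl]
        at this
      simp only [pvBEmit, List.nil_append, ← this]

-- ===== VERDICT (by name: the statement is the Claim_ definition above) =====
theorem remove_repeated_phrases_spec : Claim_equal_remove_repeated_phrases := by
  intro song mr _
  unfold Spec_remove_repeated_phrases remove_repeated_phrases remove_repeated_phrases_alt
  congr 1
  cases h : (PySem.Str.split? song "\n").getD [] with
  | nil => simp [pvAOuter, pvBStep]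
  | cons l ls =>
    rw [pvAOuter, List.map_cons, List.map_cons, List.cons_append, List.foldl_cons]
    have hstep : pvBStep mr ([], none, 0) (some (PySem.Str.strip l)) =
        ([], some (PySem.Str.strip l), 1) := by simp [pvBStep]
    rw [hstep, pvBfold mr (ls.map PySem.Str.strip) [] (PySem.Str.strip l) 1 le_rfl]
    have := pvAchar mr ls (PySem.Str.strip l) 1 le_rfl
    have h1 : Int.toNat (max 1 (min (1:Int) mr)) = 1 := by omega
    simp only [h1, List.replicate_one, List.singleton_append,
      show (1:Int) - 1 = 0 from rfl] at this
    exact this
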